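-- pv_equiv track=rewrite | github.com/JenTus/unit_distance_pairs | check_forbidden_patterns.py | check_k23
-- ===== SOURCE A (Python) =====
-- import itertools
--
-- def choose_2row_3colum(five):
--     """Choose 2 as rows and 3 as colums from 5 given numbers."""
--     list_of_two = list(itertools.combinations(five, 2))
--     tmp = [[list(two), list(set(five).difference(set(two)))]
--            for two in list_of_two]
--     return tmp
--
-- def check_k23(list_of_mats, n):
--     """Return a list of mats that do not contain K23."""
--     five_list = list(itertools.combinations([i for i in range(n)], 5))
--     check_list = []
--     possible_mats = []
--     for five in five_list:
--         tmp = choose_2row_3colum(five)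
--         for tp in tmp:
--             check_list.append(tp)
--     for mats in list_of_mats:
--         flag = 0
--         for ttp in check_list:
--             [rrow, ccolum] = ttp
--             if sum([mats[row][colum] for row in rrow for colum in ccolum]) == 6:
--                 flag = 1
--                 break
--         if flag == 0:
--             possible_mats.append(mats)
--     return possible_mats
-- ===== SOURCE B (Python) =====
-- def check_k23(list_of_mats, n):
--     """Return a list of mats that do not contain K23."""
--     # a K23 pattern needs 5 distinct indices, so for n < 5 nothing is filtered
--     if n < 5:
--         return list(list_of_mats)
--     return [m for m in list_of_mats if not _has_k23(m, n)]
--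
--
-- def _has_k23(m, n):
--     # For each row pair, precompute column sums s and look for three distinct
--     # columns whose s-values total 6 with a hash set of pairwise sums (3SUM).
--     for i in range(n):
--         for j in range(i + 1, n):
--             s = [m[i][c] + m[j][c] for c in range(n) if c != i and c != j]
--             seen = set()
--             for q in range(len(s)):
--                 v = s[q]
--                 if 6 - v in seen:
--                     return True
--                 for p in range(q):
--                     seen.add(s[p] + v)
--     return False
-- ===== Notes on version B (the rewrite author's own statement) =====
-- stated objective: alternative
-- what changed: A precomputes all C(n,5)*10 (row-pair, column-triple) patterns and sums 6 entries per pattern per matrix; B instead scans each matrix's row pairs once, precomputes the pair's column sums, and detects three columns totalling 6 with a hash set of pairwise sums (3SUM style), exiting early.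
import Mathlib
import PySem

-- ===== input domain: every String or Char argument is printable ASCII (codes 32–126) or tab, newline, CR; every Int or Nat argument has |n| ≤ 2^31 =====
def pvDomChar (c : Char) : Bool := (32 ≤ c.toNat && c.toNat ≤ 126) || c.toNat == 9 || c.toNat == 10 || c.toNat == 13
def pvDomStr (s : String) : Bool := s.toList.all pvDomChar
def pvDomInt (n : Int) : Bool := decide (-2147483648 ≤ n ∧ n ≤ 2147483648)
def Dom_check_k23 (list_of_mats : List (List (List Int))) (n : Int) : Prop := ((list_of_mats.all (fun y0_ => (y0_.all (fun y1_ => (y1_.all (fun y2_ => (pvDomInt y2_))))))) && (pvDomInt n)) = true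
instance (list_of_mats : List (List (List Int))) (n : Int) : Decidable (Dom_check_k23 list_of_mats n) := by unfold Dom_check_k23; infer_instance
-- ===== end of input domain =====

-- B replaces A's global pattern enumeration (all 2-rows/3-columns splits of every 5-subset)
-- by a per-row-pair 3SUM scan over precomputed column sums with early exit (a different algorithm).

-- shared indexing helper: mats[row][col]; under Pre_ every index that is reached is in
-- range, so pyGet? is `some` and the 0/[] defaults are never used.
def pvAt (m : List (List Int)) (r c : Int) : Int :=
  (PySem.List.pyGet? ((PySem.List.pyGet? m r).getD []) c).getD 0

-- ===== PORT A =====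
-- itertools.combinations(xs, k), lexicographic order of positions
def pvComb {α : Type} : List α → Nat → List (List α)
  | _, 0 => [[]]
  | [], _+1 => []
  | x :: xs, k+1 => ((pvComb xs k).map (fun t => x :: t)) ++ pvComb xs (k+1)

-- list(set(five).difference(set(two))) ported as an order-preserving filter: exact up to
-- CPython's set iteration order, which only permutes the three columns inside one pattern
-- and never changes the 6-entry sum A takes over them (nor, hence, A's return value).
def choose_2row_3colum (five : List Int) : List (List Int × List Int) :=
  (pvComb five 2).map (fun two => (two, five.filter (fun c => !two.contains c)))

-- sum([mats[row][colum] for row in rrow for colum in ccolum])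
def pvSumPat (mats : List (List Int)) (ttp : List Int × List Int) : Int :=
  (ttp.1.flatMap (fun row => ttp.2.map (fun col => pvAt mats row col))).sum

-- the flag/break loop over check_list
def pvFlagA (mats : List (List Int)) : List (List Int × List Int) → Bool
  | [] => false
  | ttp :: rest => if pvSumPat mats ttp = 6 then true else pvFlagA mats rest

-- the outer loop appending mats with flag == 0
def pvFilterA (check_list : List (List Int × List Int)) : List (List (List Int)) → List (List (List Int))
  | [] => []
  | m :: rest =>
      if pvFlagA m check_list then pvFilterA check_list rest
      else m :: pvFilterA check_list rest

def check_k23 (list_of_mats : List (List (List Int))) (n : Int) : List (List (List Int)) :=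
  let five_list := pvComb (PySem.List.pyRange 0 n 1) 5
  let check_list := five_list.flatMap choose_2row_3colum
  pvFilterA check_list list_of_mats

-- ===== PORT B =====
-- s = [m[i][c] + m[j][c] for c in range(n) if c != i and c != j]
def pvColSums (m : List (List Int)) (i j n : Int) : List Int :=
  ((PySem.List.pyRange 0 n 1).filter (fun c => c != i && c != j)).map
    (fun c => pvAt m i c + pvAt m j c)

-- the `for q …: if 6 - s[q] in seen: return True; for p in range(q): seen.add(s[p] + v)`
-- loop; `pre` is the already-processed prefix s[:q]
def pvTripleLoop (seen : PySem.Set Int) (pre : List Int) : List Int → Bool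
  | [] => false
  | v :: rest =>
      if PySem.Set.contains seen (6 - v) then true
      else pvTripleLoop (pre.foldl (fun a u => PySem.Set.add a (u + v)) seen) (pre ++ [v]) rest

def pvHasK23 (m : List (List Int)) (n : Int) : Bool :=
  (PySem.List.pyRange 0 n 1).any (fun i =>
    (PySem.List.pyRange (i + 1) n 1).any (fun j =>
      pvTripleLoop PySem.Set.empty [] (pvColSums m i j n)))

def check_k23_alt (list_of_mats : List (List (List Int))) (n : Int) : List (List (List Int)) :=
  if n < 5 then list_of_mats
  else list_of_mats.filter (fun m => !pvHasK23 m n)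

-- ===== PRECONDITION & SPEC =====
-- Pre_ excludes inputs with n ≥ 5 in which some matrix is missing an entry at a row/column
-- index below n: there A in general raises IndexError (on a few such inputs A still returns,
-- when the flag/break fires before the missing entry is read — see the cite in the claim).
def Pre_check_k23 (list_of_mats : List (List (List Int))) (n : Int) : Prop :=
  n < 5 ∨ ∀ m ∈ list_of_mats, n ≤ (m.length : Int) ∧ ∀ row ∈ m, n ≤ (row.length : Int)
instance (list_of_mats : List (List (List Int))) (n : Int) : Decidable (Pre_check_k23 list_of_mats n) := by
  unfold Pre_check_k23; infer_instance

def pvWitness_check_k23 : List (List (List Int)) × Int :=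
  ([[[1, 1, 0, 0, 0], [1, 1, 0, 0, 0], [0, 0, 1, 0, 0], [0, 0, 0, 1, 0], [0, 0, 0, 0, 1]]], 5)

def Spec_check_k23 (list_of_mats : List (List (List Int))) (n : Int) (out : List (List (List Int))) : Prop := out = check_k23_alt list_of_mats n
instance (list_of_mats : List (List (List Int))) (n : Int) (out : List (List (List Int))) : Decidable (Spec_check_k23 list_of_mats n out) := by unfold Spec_check_k23; infer_instance

-- ===== CLAIM (what is proved, stated in full; the proofs are below) =====
def Claim_equal_check_k23 : Prop := ∀ (list_of_mats : List (List (List Int))) (n : Int), Dom_check_k23 list_of_mats n → Pre_check_k23 list_of_mats n → Spec_check_k23 list_of_mats n (check_k23 list_of_mats n)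

-- ===== LEMMAS AND PROOFS =====

-- the common characterisation both programs are reduced to: a K23 witness
-- (two rows i < j and three columns c1 < c2 < c3, all five distinct, all in [0, n),
-- whose six entries sum to 6)
def pvCanon (m : List (List Int)) (n : Int) : Prop :=
  ∃ i j c1 c2 c3 : Int, 0 ≤ i ∧ i < j ∧ j < n ∧ 0 ≤ c1 ∧ c1 < c2 ∧ c2 < c3 ∧ c3 < n ∧
    c1 ≠ i ∧ c1 ≠ j ∧ c2 ≠ i ∧ c2 ≠ j ∧ c3 ≠ i ∧ c3 ≠ j ∧
    pvAt m i c1 + pvAt m i c2 + pvAt m i c3 + pvAt m j c1 + pvAt m j c2 + pvAt m j c3 = 6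

lemma mem_pvComb {α : Type} (xs : List α) (k : Nat) (l : List α) :
    l ∈ pvComb xs k ↔ l.Sublist xs ∧ l.length = k := by
  induction xs generalizing l k with
  | nil =>
      cases k with
      | zero => simp [pvComb, List.sublist_nil, List.length_eq_zero_iff]
      | succ k =>
          simp only [pvComb, List.not_mem_nil, false_iff, not_and, List.sublist_nil]
          rintro rfl; simp
  | cons x xs ih =>
      cases k with
      | zero =>
          simp [pvComb, List.length_eq_zero_iff]
          rintro rfl; exact List.nil_sublist _
      | succ k =>
          simp only [pvComb, List.mem_append, List.mem_map, ih]
          constructor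
          · rintro (⟨t, ⟨hs, hl⟩, rfl⟩ | ⟨hs, hl⟩)
            · exact ⟨List.cons_sublist_cons.mpr hs, by simp [hl]⟩
            · exact ⟨hs.trans (List.sublist_cons_self x xs), hl⟩
          · rintro ⟨hs, hl⟩
            rcases List.sublist_cons_iff.mp hs with h | ⟨r, rfl, hr⟩
            · exact Or.inr ⟨h, hl⟩
            · exact Or.inl ⟨r, ⟨hr, by simpa using hl⟩, rfl⟩

lemma pvComb_eq_nil {α : Type} (xs : List α) (k : Nat) (h : xs.length < k) :
    pvComb xs k = [] := by
  rw [List.eq_nil_iff_forall_not_mem]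
  intro l hl
  rcases (mem_pvComb xs k l).mp hl with ⟨hs, hlen⟩
  have := hs.length_le
  omega

lemma pvFlagA_iff (m : List (List Int)) (cl : List (List Int × List Int)) :
    pvFlagA m cl = true ↔ ∃ t ∈ cl, pvSumPat m t = 6 := by
  induction cl with
  | nil => simp [pvFlagA]
  | cons t rest ih =>
      simp only [pvFlagA]
      split_ifs with h
      · simp [h]
      · simp [ih, h]

-- a strictly increasing list whose members lie in a strictly increasing list is a sublist of it
lemma pvSortedSublist (l r : List Int) (hr : r.Pairwise (· < ·)) (hl : l.Pairwise (· < ·))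
    (hsub : ∀ x ∈ l, x ∈ r) : l.Sublist r := by
  induction r generalizing l with
  | nil =>
      cases l with
      | nil => simp
      | cons y l => exact absurd (hsub y (by simp)) (by simp)
  | cons a r ih =>
      cases l with
      | nil => simp
      | cons y l =>
          rcases List.pairwise_cons.mp hr with ⟨ha, hr'⟩
          rcases List.pairwise_cons.mp hl with ⟨hy, hl'⟩
          by_cases hya : y = a
          · subst hya
            apply List.cons_sublist_cons.mpr
            apply ih _ hr' hl'
            intro x hx
            have hxr : x ∈ y :: r := hsub x (by simp [hx])
            rcases List.mem_cons.mp hxr with rfl | h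
            · exact absurd (hy x hx) (lt_irrefl x)
            · exact h
          · have hyr : y ∈ r := by
              rcases List.mem_cons.mp (hsub y (by simp)) with rfl | h
              · exact absurd rfl hya
              · exact h
            have : (y :: l).Sublist r := by
              apply ih _ hr' (List.pairwise_cons.mpr ⟨hy, hl'⟩)
              intro x hx
              rcases List.mem_cons.mp hx with rfl | hxl
              · exact hyr
              · rcases List.mem_cons.mp (hsub x (by simp [hxl])) with rfl | h
                · exact absurd (lt_trans (ha y hyr) (hy x hxl)) (lt_irrefl x)
                · exact h
            exact this.trans (List.sublist_cons_self a r)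

-- filtering a strictly increasing list by membership in a sublist gives back the sublist
lemma pvFilterContains (l r : List Int) (hr : r.Pairwise (· < ·)) (hsl : l.Sublist r) :
    r.filter (fun x => l.contains x) = l := by
  induction hsl with
  | slnil => simp
  | @cons l r a h ih =>
      rcases List.pairwise_cons.mp hr with ⟨ha, hr'⟩
      have hna : a ∉ l := by
        intro hal
        exact absurd (ha a (h.subset hal)) (lt_irrefl a)
      have hi := ih hr'
      simp only [List.contains_eq_mem] at hi
      simp [hna, hi]
  | @cons₂ l r a h ih =>
      rcases List.pairwise_cons.mp hr with ⟨ha, hr'⟩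
      have hcongr : List.filter (fun x => (a :: l).contains x) r
          = List.filter (fun x => l.contains x) r := by
        apply List.filter_congr
        intro x hx
        have hxa : x ≠ a := (ha x hx).ne'
        simp [List.contains_eq_mem, hxa]
      have h1 : a ∈ (a :: l) := by simp
      simp only [List.filter_cons, List.contains_eq_mem, decide_eq_true_eq, if_pos h1]
      rw [show (fun x => decide (x ∈ a :: l)) = (fun x => (a :: l).contains x) by
            funext x; simp [List.contains_eq_mem], hcongr]
      rw [ih hr']

lemma pvMemPyRange (n x : Int) : x ∈ PySem.List.pyRange 0 n 1 ↔ 0 ≤ x ∧ x < n := by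
  simp [PySem.List.mem_pyRange_one]

lemma pvAside (m : List (List Int)) (n : Int) :
    pvFlagA m ((pvComb (PySem.List.pyRange 0 n 1) 5).flatMap choose_2row_3colum) = true
      ↔ pvCanon m n := by
  have hRp : (PySem.List.pyRange 0 n 1).Pairwise (· < ·) :=
    PySem.List.pairwise_lt_pyRange_one 0 n
  rw [pvFlagA_iff]
  constructor
  · rintro ⟨t, ht, hsum⟩
    simp only [List.mem_flatMap, choose_2row_3colum, List.mem_map] at ht
    obtain ⟨five, hfive, two, htwo, rfl⟩ := ht
    rw [mem_pvComb] at hfive htwo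
    obtain ⟨hfs, hf5⟩ := hfive
    obtain ⟨hts, ht2⟩ := htwo
    have hfp : five.Pairwise (· < ·) := List.Pairwise.sublist hfs hRp
    have htp : two.Pairwise (· < ·) := List.Pairwise.sublist hts hfp
    obtain ⟨i, j, rfl⟩ := List.length_eq_two.mp ht2
    have hij : i < j := by
      have := List.pairwise_cons.mp htp
      exact this.1 j (by simp)
    have hlen3 : (five.filter (fun c => !([i, j]).contains c)).length = 3 := by
      have hpart := (List.length_eq_length_filter_add
        (l := five) (fun c => ([i, j]).contains c)).symm
      have hfc : five.filter (fun c => ([i, j]).contains c) = [i, j] :=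
        pvFilterContains [i, j] five hfp hts
      rw [hfc] at hpart
      simp only [List.length_cons, List.length_nil] at hpart
      omega
    obtain ⟨c1, c2, c3, hthree⟩ := List.length_eq_three.mp hlen3
    have hthp : ([c1, c2, c3] : List Int).Pairwise (· < ·) := by
      rw [← hthree]; exact List.Pairwise.sublist List.filter_sublist hfp
    have hcmem : ∀ c ∈ ([c1, c2, c3] : List Int), (0 ≤ c ∧ c < n) ∧ c ≠ i ∧ c ≠ j := by
      intro c hc
      rw [← hthree, List.mem_filter] at hc
      obtain ⟨hcf, hcni⟩ := hc
      simp only [List.contains_eq_mem, List.mem_cons, List.not_mem_nil, or_false,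
        Bool.not_eq_eq_eq_not, Bool.not_true, decide_eq_false_iff_not, not_or] at hcni
      exact ⟨(pvMemPyRange n c).mp (hfs.subset hcf), hcni⟩
    have hiR : 0 ≤ i ∧ i < n := (pvMemPyRange n i).mp (hfs.subset (hts.subset (by simp)))
    have hjR : 0 ≤ j ∧ j < n := (pvMemPyRange n j).mp (hfs.subset (hts.subset (by simp)))
    rw [hthree] at hsum
    simp only [pvSumPat, List.flatMap_cons, List.map_cons, List.map_nil, List.flatMap_nil,
      List.sum_append, List.sum_cons, List.sum_nil] at hsum
    obtain ⟨h1, h2⟩ := List.pairwise_cons.mp hthp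
    refine ⟨i, j, c1, c2, c3, hiR.1, hij, hjR.2, (hcmem c1 (by simp)).1.1,
      h1 c2 (by simp), (List.pairwise_cons.mp h2).1 c3 (by simp), (hcmem c3 (by simp)).1.2,
      (hcmem c1 (by simp)).2.1, (hcmem c1 (by simp)).2.2, (hcmem c2 (by simp)).2.1,
      (hcmem c2 (by simp)).2.2, (hcmem c3 (by simp)).2.1, (hcmem c3 (by simp)).2.2, by linarith⟩
  · rintro ⟨i, j, c1, c2, c3, h0i, hij, hjn, h0c1, h12, h23, h3n,
      hc1i, hc1j, hc2i, hc2j, hc3i, hc3j, hsum⟩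
    set R := PySem.List.pyRange 0 n 1 with hR
    set five := R.filter (fun x => x == i || x == j || x == c1 || x == c2 || x == c3) with hfive
    have hfs : five.Sublist R := List.filter_sublist
    have hfp : five.Pairwise (· < ·) := List.Pairwise.sublist hfs hRp
    have hmemfive : ∀ x, x ∈ five ↔ (0 ≤ x ∧ x < n) ∧ (x = i ∨ x = j ∨ x = c1 ∨ x = c2 ∨ x = c3) := by
      intro x
      rw [hfive, List.mem_filter, pvMemPyRange]
      simp only [Bool.or_eq_true, beq_iff_eq]
      tauto
    have hifive : i ∈ five := (hmemfive i).mpr ⟨⟨h0i, by omega⟩, by tauto⟩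
    have hjfive : j ∈ five := (hmemfive j).mpr ⟨⟨by omega, hjn⟩, by tauto⟩
    have hc1five : c1 ∈ five := (hmemfive c1).mpr ⟨⟨h0c1, by omega⟩, by tauto⟩
    have hc2five : c2 ∈ five := (hmemfive c2).mpr ⟨⟨by omega, by omega⟩, by tauto⟩
    have hc3five : c3 ∈ five := (hmemfive c3).mpr ⟨⟨by omega, h3n⟩, by tauto⟩
    have htwo_sl : ([i, j] : List Int).Sublist five := by
      apply pvSortedSublist _ _ hfp (by simp [hij])
      intro x hx
      rcases List.mem_cons.mp hx with rfl | hx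
      · exact hifive
      · simp only [List.mem_cons, List.not_mem_nil, or_false] at hx
        exact hx ▸ hjfive
    have hthree_sl : ([c1, c2, c3] : List Int).Sublist five := by
      apply pvSortedSublist _ _ hfp (by simp [h12, h23]; omega)
      intro x hx
      simp only [List.mem_cons, List.not_mem_nil, or_false] at hx
      rcases hx with rfl | rfl | rfl
      · exact hc1five
      · exact hc2five
      · exact hc3five
    have hthree : five.filter (fun c => !([i, j]).contains c) = [c1, c2, c3] := by
      have hsame : five.filter (fun c => !([i, j]).contains c)
          = five.filter (fun c => ([c1, c2, c3] : List Int).contains c) := by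
        apply List.filter_congr
        intro x hx
        rcases ((hmemfive x).mp hx).2 with rfl | rfl | rfl | rfl | rfl <;>
          simp_all [List.contains_eq_mem] <;> omega
      rw [hsame]
      exact pvFilterContains _ _ hfp hthree_sl
    have htwo_f : five.filter (fun c => ([i, j]).contains c) = [i, j] :=
      pvFilterContains _ _ hfp htwo_sl
    have hf5 : five.length = 5 := by
      have hpart := (List.length_eq_length_filter_add
        (l := five) (fun c => ([i, j]).contains c)).symm
      rw [htwo_f, hthree] at hpart
      simp only [List.length_cons, List.length_nil] at hpart
      omega
    refine ⟨([i, j], [c1, c2, c3]), ?_, ?_⟩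
    · simp only [List.mem_flatMap, choose_2row_3colum, List.mem_map]
      exact ⟨five, (mem_pvComb _ _ _).mpr ⟨hfs, hf5⟩,
        [i, j], (mem_pvComb _ _ _).mpr ⟨htwo_sl, rfl⟩, by rw [hthree]⟩
    · simp only [pvSumPat, List.flatMap_cons, List.map_cons, List.map_nil, List.flatMap_nil,
        List.sum_append, List.sum_cons, List.sum_nil]
      linarith

-- loop invariant of the `seen`-set 3SUM scan: `pre` is the processed prefix, `seen` holds
-- exactly the pairwise sums of `pre`; the loop finds a triple whose last element is in `rest`
lemma pvTripleLoop_iff (rest pre : List Int) (seen : PySem.Set Int)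
    (hseen : ∀ t : Int, t ∈ seen ↔ ∃ p q : Nat, p < q ∧ q < pre.length ∧
      pre.getD p 0 + pre.getD q 0 = t) :
    pvTripleLoop seen pre rest = true ↔
      ∃ p q r : Nat, p < q ∧ q < r ∧ r < pre.length + rest.length ∧ pre.length ≤ r ∧
        (pre ++ rest).getD p 0 + (pre ++ rest).getD q 0 + (pre ++ rest).getD r 0 = 6 := by
  induction rest generalizing pre seen with
  | nil =>
      simp only [pvTripleLoop, List.length_nil, List.append_nil, Bool.false_eq_true, false_iff]
      rintro ⟨p, q, r, _, _, h1, h2, _⟩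
      omega
  | cons v rest ih =>
      simp only [pvTripleLoop]
      by_cases hc : PySem.Set.contains seen (6 - v) = true
      · rw [if_pos hc]
        have hrb : pre.length < pre.length + (v :: rest).length := by simp
        constructor
        · intro _
          obtain ⟨p, q, hpq, hq, hsum⟩ := (hseen _).mp (List.mem_of_elem_eq_true hc)
          refine ⟨p, q, pre.length, hpq, hq, hrb, le_refl _, ?_⟩
          rw [List.getD_append _ _ 0 p (by omega), List.getD_append _ _ 0 q (by omega),
            List.getD_append_right _ _ 0 _ (le_refl _)]
          simp only [Nat.sub_self, List.getD_cons_zero]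
          omega
        · intro _; rfl
      · rw [if_neg hc]
        have hnot : ¬ ∃ p q : Nat, p < q ∧ q < pre.length ∧ pre.getD p 0 + pre.getD q 0 = 6 - v := by
          intro h
          exact hc (List.elem_eq_true_of_mem ((hseen _).mpr h))
        have hseen' : ∀ t : Int, t ∈ pre.foldl (fun a u => PySem.Set.add a (u + v)) seen ↔
            ∃ p q : Nat, p < q ∧ q < (pre ++ [v]).length ∧
              (pre ++ [v]).getD p 0 + (pre ++ [v]).getD q 0 = t := by
          intro t
          rw [PySem.Set.mem_foldl_add]
          constructor
          · rintro (hs | ⟨b, hb, rfl⟩)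
            · obtain ⟨p, q, hpq, hq, hsum⟩ := (hseen t).mp hs
              have hlv : q < (pre ++ [v]).length := by simp; omega
              refine ⟨p, q, hpq, hlv, ?_⟩
              rw [List.getD_append _ _ 0 p (by omega), List.getD_append _ _ 0 q (by omega)]
              exact hsum
            · obtain ⟨p, hp, hbp⟩ := List.mem_iff_getElem.mp hb
              have hlv2 : pre.length < (pre ++ [v]).length := by simp
              refine ⟨p, pre.length, hp, hlv2, ?_⟩
              rw [List.getD_append _ _ 0 p (by omega),
                List.getD_append_right _ _ 0 _ (le_refl _)]
              simp only [Nat.sub_self, List.getD_cons_zero]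
              rw [List.getD_eq_getElem _ _ hp, hbp]
            
          · rintro ⟨p, q, hpq, hq, hsum⟩
            simp only [List.length_append, List.length_cons, List.length_nil] at hq
            by_cases hqp : q < pre.length
            · left
              apply (hseen t).mpr
              refine ⟨p, q, hpq, hqp, ?_⟩
              rw [List.getD_append _ _ 0 p (by omega), List.getD_append _ _ 0 q (by omega)] at hsum
              exact hsum
            · right
              have hqe : q = pre.length := by omega
              subst hqe
              have hp : p < pre.length := hpq
              refine ⟨pre.getD p 0, ?_, ?_⟩
              · rw [List.getD_eq_getElem _ _ hp]
                exact List.getElem_mem hp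
              · rw [List.getD_append _ _ 0 p (by omega),
                  List.getD_append_right _ _ 0 _ (le_refl _)] at hsum
                simp only [Nat.sub_self, List.getD_cons_zero] at hsum
                omega
        rw [ih (pre ++ [v]) _ hseen']
        have happ : (pre ++ [v]) ++ rest = pre ++ v :: rest := by simp
        rw [happ]
        simp only [List.length_append, List.length_cons, List.length_nil]
        constructor
        · rintro ⟨p, q, r, hpq, hqr, hr1, hr2, hsum⟩
          exact ⟨p, q, r, hpq, hqr, by omega, by omega, hsum⟩
        · rintro ⟨p, q, r, hpq, hqr, hr1, hr2, hsum⟩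
          by_cases hre : r = pre.length
          · exfalso
            subst hre
            apply hnot
            refine ⟨p, q, hpq, hqr, ?_⟩
            rw [List.getD_append _ _ 0 p (by omega), List.getD_append _ _ 0 q (by omega),
              List.getD_append_right _ _ 0 _ (le_refl _)] at hsum
            simp only [Nat.sub_self, List.getD_cons_zero] at hsum
            omega
          · exact ⟨p, q, r, hpq, hqr, by omega, by omega, hsum⟩

-- the inner double loop of B, characterised by column-triple witnesses
lemma pvTrip_iff (m : List (List Int)) (i j n : Int) :
    pvTripleLoop PySem.Set.empty [] (pvColSums m i j n) = true ↔
      ∃ c1 c2 c3 : Int, 0 ≤ c1 ∧ c1 < c2 ∧ c2 < c3 ∧ c3 < n ∧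
        c1 ≠ i ∧ c1 ≠ j ∧ c2 ≠ i ∧ c2 ≠ j ∧ c3 ≠ i ∧ c3 ≠ j ∧
        pvAt m i c1 + pvAt m j c1 + (pvAt m i c2 + pvAt m j c2) +
          (pvAt m i c3 + pvAt m j c3) = 6 := by
  have h0 : ∀ t : Int, t ∈ (PySem.Set.empty : PySem.Set Int) ↔
      ∃ p q : Nat, p < q ∧ q < ([] : List Int).length ∧
        ([] : List Int).getD p 0 + ([] : List Int).getD q 0 = t := by
    simp [PySem.Set.empty]
  rw [pvTripleLoop_iff _ [] _ h0]
  simp only [List.nil_append, List.length_nil, Nat.zero_add, Nat.zero_le, true_and]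
  set cols := (PySem.List.pyRange 0 n 1).filter (fun c => c != i && c != j) with hcols
  have hclp : cols.Pairwise (· < ·) :=
    List.Pairwise.sublist List.filter_sublist (PySem.List.pairwise_lt_pyRange_one 0 n)
  have hmemcols : ∀ x : Int, x ∈ cols ↔ (0 ≤ x ∧ x < n) ∧ x ≠ i ∧ x ≠ j := by
    intro x
    rw [hcols, List.mem_filter, pvMemPyRange]
    simp [bne_iff_ne]
  have hlen : (pvColSums m i j n).length = cols.length := by
    simp [pvColSums, hcols]
  have hgd : ∀ k : Nat, (hk : k < cols.length) →
      (pvColSums m i j n).getD k 0 = pvAt m i cols[k] + pvAt m j cols[k] := by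
    intro k hk
    rw [List.getD_eq_getElem _ _ (by omega)]
    simp [pvColSums, hcols]
  constructor
  · rintro ⟨p, q, r, hpq, hqr, hr, hsum⟩
    rw [hlen] at hr
    have hp : p < cols.length := by omega
    have hq : q < cols.length := by omega
    rw [hgd p (by omega), hgd q (by omega), hgd r (by omega)] at hsum
    have hgl := List.pairwise_iff_getElem.mp hclp
    refine ⟨cols[p], cols[q], cols[r],
      ((hmemcols _).mp (List.getElem_mem hp)).1.1,
      hgl p q hp hq hpq, hgl q r hq hr hqr,
      ((hmemcols _).mp (List.getElem_mem hr)).1.2,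
      ((hmemcols _).mp (List.getElem_mem hp)).2.1,
      ((hmemcols _).mp (List.getElem_mem hp)).2.2,
      ((hmemcols _).mp (List.getElem_mem hq)).2.1,
      ((hmemcols _).mp (List.getElem_mem hq)).2.2,
      ((hmemcols _).mp (List.getElem_mem hr)).2.1,
      ((hmemcols _).mp (List.getElem_mem hr)).2.2, hsum⟩
  · rintro ⟨c1, c2, c3, h0c1, h12, h23, h3n, hc1i, hc1j, hc2i, hc2j, hc3i, hc3j, hsum⟩
    obtain ⟨p, hp, hcp⟩ := List.mem_iff_getElem.mp ((hmemcols c1).mpr ⟨⟨h0c1, by omega⟩, hc1i, hc1j⟩)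
    obtain ⟨q, hq, hcq⟩ := List.mem_iff_getElem.mp ((hmemcols c2).mpr ⟨⟨by omega, by omega⟩, hc2i, hc2j⟩)
    obtain ⟨r, hr, hcr⟩ := List.mem_iff_getElem.mp ((hmemcols c3).mpr ⟨⟨by omega, h3n⟩, hc3i, hc3j⟩)
    have hgl := List.pairwise_iff_getElem.mp hclp
    have hpq : p < q := by
      rcases lt_trichotomy p q with h | h | h
      · exact h
      · exfalso; subst h; rw [hcp] at hcq; omega
      · exfalso; have := hgl q p hq hp h; rw [hcp, hcq] at this; omega
    have hqr : q < r := by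
      rcases lt_trichotomy q r with h | h | h
      · exact h
      · exfalso; subst h; rw [hcq] at hcr; omega
      · exfalso; have := hgl r q hr hq h; rw [hcq, hcr] at this; omega
    refine ⟨p, q, r, hpq, hqr, by omega, ?_⟩
    rw [hgd p (by omega), hgd q (by omega), hgd r (by omega), hcp, hcq, hcr]
    exact hsum

lemma pvBside (m : List (List Int)) (n : Int) :
    pvHasK23 m n = true ↔ pvCanon m n := by
  simp only [pvHasK23, List.any_eq_true]
  constructor
  · rintro ⟨i, hi, j, hj, htrip⟩
    rw [PySem.List.mem_pyRange_one] at hi hj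
    obtain ⟨c1, c2, c3, h0c1, h12, h23, h3n, hc1i, hc1j, hc2i, hc2j, hc3i, hc3j, hsum⟩ :=
      (pvTrip_iff m i j n).mp htrip
    exact ⟨i, j, c1, c2, c3, by omega, by omega, by omega, h0c1, h12, h23, h3n,
      hc1i, hc1j, hc2i, hc2j, hc3i, hc3j, by linarith⟩
  · rintro ⟨i, j, c1, c2, c3, h0i, hij, hjn, h0c1, h12, h23, h3n,
      hc1i, hc1j, hc2i, hc2j, hc3i, hc3j, hsum⟩
    refine ⟨i, ?_, j, ?_, ?_⟩
    · rw [PySem.List.mem_pyRange_one]; omega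
    · rw [PySem.List.mem_pyRange_one]; omega
    · exact (pvTrip_iff m i j n).mpr ⟨c1, c2, c3, h0c1, h12, h23, h3n,
        hc1i, hc1j, hc2i, hc2j, hc3i, hc3j, by linarith⟩

lemma pvFlag_eq_has (m : List (List Int)) (n : Int) :
    pvFlagA m ((pvComb (PySem.List.pyRange 0 n 1) 5).flatMap choose_2row_3colum)
      = pvHasK23 m n := by
  cases hB : pvHasK23 m n with
  | true => exact (pvAside m n).mpr ((pvBside m n).mp hB)
  | false =>
      apply Bool.eq_false_iff.mpr
      intro hA
      rw [(pvBside m n).mpr ((pvAside m n).mp hA)] at hB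
      exact Bool.true_eq_false.mp hB

lemma pvFilterA_nil (l : List (List (List Int))) : pvFilterA [] l = l := by
  induction l with
  | nil => rfl
  | cons m rest ih => simp [pvFilterA, pvFlagA, ih]

lemma pvFilterA_eq_filter (n : Int) (l : List (List (List Int))) :
    pvFilterA ((pvComb (PySem.List.pyRange 0 n 1) 5).flatMap choose_2row_3colum) l
      = l.filter (fun m => !pvHasK23 m n) := by
  induction l with
  | nil => rfl
  | cons m rest ih =>
      simp only [pvFilterA, pvFlag_eq_has, List.filter_cons, ih]
      cases pvHasK23 m n <;> simp

theorem check_k23_spec : Claim_equal_check_k23 := by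
  intro l n _ _
  unfold Spec_check_k23 check_k23 check_k23_alt
  by_cases h5 : n < 5
  · rw [if_pos h5]
    have hnil : pvComb (PySem.List.pyRange 0 n 1) 5 = [] := by
      apply pvComb_eq_nil
      rw [PySem.List.length_pyRange_one]
      omega
    simp only [hnil, List.flatMap_nil]
    exact pvFilterA_nil l
  · rw [if_neg h5]
    exact pvFilterA_eq_filter n l
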